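-- pv_equiv track=rewrite | github.com/kammitama5/Distracting_KATAS | stringreverseslicing101.py | reverse_slice
-- ===== SOURCE A (Python) =====
-- def reverse_slice(s):
--     b = s
--     a = list(b)
--     count = ""
--     arr = []
--
--     for i in range(0, len(a)):
--        count = (count + a[i])
--        e = count[::-1]
--        arr.insert(0, e)
--     return arr
-- ===== SOURCE B (Python) =====
-- def reverse_slice(s):
--     r = s[::-1]
--     return [r[i:] for i in range(len(s))]
-- ===== Notes on version B (the rewrite author's own statement) =====
-- stated objective: alternative
-- what changed: B reverses the string once and emits each output element as a suffix slice r[i:] of that single reversal, instead of growing a prefix, re-reversing it each iteration and front-inserting into the result list.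
import Mathlib
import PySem

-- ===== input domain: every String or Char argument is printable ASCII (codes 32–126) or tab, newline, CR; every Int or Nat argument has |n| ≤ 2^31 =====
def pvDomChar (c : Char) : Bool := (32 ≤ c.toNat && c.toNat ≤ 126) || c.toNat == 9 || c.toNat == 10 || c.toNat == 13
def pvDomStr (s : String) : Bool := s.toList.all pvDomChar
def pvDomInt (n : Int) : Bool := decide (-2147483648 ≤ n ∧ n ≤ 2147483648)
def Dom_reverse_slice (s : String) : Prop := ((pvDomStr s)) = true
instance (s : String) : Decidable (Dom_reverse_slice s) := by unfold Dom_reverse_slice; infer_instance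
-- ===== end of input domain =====

-- ===== PORT A =====
-- B reverses once and slices suffixes instead of re-reversing a growing prefix and front-inserting (objective: alternative decomposition).
-- loop body of A: count = count + a[i]; e = count[::-1]; arr.insert(0, e)  (index i always in range, so getD is exact)
def pvStepA (a : List Char) (st : List Char × List String) (i : Nat) : List Char × List String :=
  let count := st.1 ++ [a.getD i ' ']
  (count, String.mk count.reverse :: st.2)

def reverse_slice (s : String) : List String :=
  ((List.range s.toList.length).foldl (pvStepA s.toList) ([], [])).2

-- ===== PORT B =====
def reverse_slice_alt (s : String) : List String :=
  (List.range s.toList.reverse.length).map (fun i => String.mk (s.toList.reverse.drop i))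

-- ===== PRECONDITION & SPEC =====
def Spec_reverse_slice (s : String) (out : List String) : Prop := out = reverse_slice_alt s
instance (s : String) (out : List String) : Decidable (Spec_reverse_slice s out) := by unfold Spec_reverse_slice; infer_instance

-- ===== CLAIM (what is proved, stated in full; the proofs are below) =====
def Claim_equal_reverse_slice : Prop := ∀ (s : String), Dom_reverse_slice s → Spec_reverse_slice s (reverse_slice s)

-- ===== LEMMAS AND PROOFS =====

-- ===== VERDICT (by name: the statement is the Claim_ definition above) =====
lemma pvFoldA (a : List Char) (k : Nat) (hk : k ≤ a.length) :
    (List.range k).foldl (pvStepA a) ([], []) =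
    (a.take k, (List.range k).map (fun j => String.mk ((a.take k).reverse.drop j))) := by
  induction k with
  | zero => simp
  | succ k ih =>
    have hk' : k < a.length := hk
    have htake : a.take (k+1) = a.take k ++ [a.getD k ' '] := by
      rw [List.take_succ]
      simp [List.getD, List.getElem?_eq_getElem hk']
    conv_lhs => rw [List.range_succ, List.foldl_append, ih (Nat.le_of_lt hk'),
      List.foldl_cons, List.foldl_nil]
    conv_rhs => rw [List.range_succ_eq_map]
    simp [pvStepA, htake, List.map_map, Function.comp_def]

theorem reverse_slice_spec : Claim_equal_reverse_slice := by
  intro s _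
  unfold Spec_reverse_slice reverse_slice reverse_slice_alt
  rw [pvFoldA s.toList s.toList.length (le_refl _)]
  simp [- String.length_toList]
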